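-- pv_equiv track=rewrite | github.com/ARM-software/m0n0-library-and-examples | adpdev/registers_models/registers_model.py | reg_bits
-- ===== SOURCE A (Python) =====
-- def reg_bits(val, msb, lsb):
--     """Returns a string representation of a bitgroup in a binary string form (i.e. a register). E.g. used for bit group PoR binary values in latex and html documentation tables.
--
--     :param val: the full register value (typically the PoR value)
--     :type val: int
--     :param msb: The MSB index of the bit group within the register
--     :type msb: int
--     :param lsb: The LSB index of the bit group within the register
--     :type lsb: int
--     :return: the binary bit group value
--     :rtype: str
--     """
--     new_val = "{0:0100b}".format(val)
--     new_val = new_val[::-1]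
--     new_val = new_val[lsb:msb+1]
--     new_val = list(new_val)
--     new_val = [new_val[i]+' ' if ((i+1) % 8 == 0) else new_val[i]
--                for i in range(0, len(new_val))]
--     new_val = ''.join(new_val)
--     new_val = new_val.strip()
--     return (str(len(new_val.replace(' ','')))+'b'+new_val[::-1])
-- ===== SOURCE B (Python) =====
-- def reg_bits(val, msb, lsb):
--     """Binary bit-group string; chunk-join rewrite of the per-index space comprehension."""
--     full = "{0:0100b}".format(val)[::-1]
--     bits = full[lsb:msb+1]
--     spaced = ' '.join(bits[i:i+8] for i in range(0, len(bits), 8))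
--     return str(len(bits)) + 'b' + spaced[::-1]
-- ===== Notes on version B (the rewrite author's own statement) =====
-- stated objective: simpler
-- what changed: Replaces the per-index space-insertion comprehension followed by strip() and a replace()-based recount with a direct ' '.join of 8-character chunks of the slice, taking the bit count straight from the slice length.
import Mathlib
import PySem

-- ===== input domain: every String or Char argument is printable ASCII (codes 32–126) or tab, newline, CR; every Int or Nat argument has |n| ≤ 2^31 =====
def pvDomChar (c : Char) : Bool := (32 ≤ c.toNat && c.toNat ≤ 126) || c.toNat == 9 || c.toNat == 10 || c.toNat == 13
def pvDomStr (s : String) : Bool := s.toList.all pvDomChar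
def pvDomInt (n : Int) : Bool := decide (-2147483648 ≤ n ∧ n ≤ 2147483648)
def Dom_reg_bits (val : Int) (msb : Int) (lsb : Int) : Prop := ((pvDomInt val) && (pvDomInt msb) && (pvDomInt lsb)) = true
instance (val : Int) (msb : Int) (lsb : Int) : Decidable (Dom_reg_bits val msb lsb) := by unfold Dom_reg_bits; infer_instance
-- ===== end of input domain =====

-- B replaces A's per-index space-insertion comprehension + strip by joining the 8-char chunks of the
-- slice with ' ', and takes the bit count directly from the slice length (objective: simpler).

-- ===== PORT A =====
def reg_bits (val : Int) (msb : Int) (lsb : Int) : String :=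
  -- "{0:0100b}".format(val): binary digits ('-' in front for negatives) zero-padded to width 100 = zfill
  let s1 : List Char := PySem.Chars.zfill (PySem.Int.toBinChars val) 100
  let s2 : List Char := s1.reverse                                        -- new_val[::-1]
  let s3 : List Char := PySem.List.slice s2 (some lsb) (some (msb + 1))   -- new_val[lsb:msb+1]
  -- the comprehension over range(0, len(new_val)): i ≥ 0, so Python's '%' is Nat '%', and
  -- new_val[i] is always in range, so getD with a dummy default is exact; ''.join = flatMap
  let s4 : List Char := (List.range s3.length).flatMap
      (fun i => if (i + 1) % 8 == 0 then [s3.getD i ' ', ' '] else [s3.getD i ' '])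
  let s5 : List Char := PySem.Chars.strip s4
  String.ofList (PySem.Int.toChars ((PySem.Chars.replace s5 [' '] []).length : Int) ++ ['b'] ++ s5.reverse)

-- ===== PORT B =====
def reg_bits_alt (val : Int) (msb : Int) (lsb : Int) : String :=
  let full : List Char := (PySem.Chars.zfill (PySem.Int.toBinChars val) 100).reverse
  let bits : List Char := PySem.List.slice full (some lsb) (some (msb + 1))
  let spaced : List Char := PySem.Chars.join [' ']
      ((PySem.List.pyRange 0 (bits.length : Int) 8).map
        (fun i => PySem.List.slice bits (some i) (some (i + 8))))   -- bits[i:i+8] for i in range(0, len(bits), 8)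
  String.ofList (PySem.Int.toChars (bits.length : Int) ++ ['b'] ++ spaced.reverse)

-- ===== PRECONDITION & SPEC =====
def Spec_reg_bits (val : Int) (msb : Int) (lsb : Int) (out : String) : Prop := out = reg_bits_alt val msb lsb
instance (val : Int) (msb : Int) (lsb : Int) (out : String) : Decidable (Spec_reg_bits val msb lsb out) := by unfold Spec_reg_bits; infer_instance

-- ===== CLAIM (what is proved, stated in full; the proofs are below) =====
def Claim_equal_reg_bits : Prop := ∀ (val : Int) (msb : Int) (lsb : Int), Dom_reg_bits val msb lsb → Spec_reg_bits val msb lsb (reg_bits val msb lsb)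

-- ===== LEMMAS AND PROOFS =====

-- the chunks bits[0:8], bits[8:16], … as a structural recursion
def chunks8 : List Char → List (List Char)
  | [] => []
  | c :: t => ((c :: t).take 8) :: chunks8 (t.drop 7)
termination_by l => l.length
decreasing_by simp [List.length_drop]

theorem chunks8_cons (c : Char) (t : List Char) :
    chunks8 (c :: t) = ((c :: t).take 8) :: chunks8 ((c :: t).drop 8) := by
  rw [chunks8.eq_def]; rfl

-- A's space-insertion comprehension, and the joined chunk list, as proof-side abbreviations
def interA (l : List Char) : List Char :=
  (List.range l.length).flatMap
    (fun i => if (i + 1) % 8 == 0 then [l.getD i ' ', ' '] else [l.getD i ' '])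

def jn (l : List Char) : List Char := List.intercalate [' '] (chunks8 l)

-- characters of the 100-bit formatted value are '0', '1' or '-'
theorem toDigitsCore_mem (fuel : Nat) : ∀ (n : Nat) (acc : List Char),
    (∀ c ∈ acc, c = '0' ∨ c = '1') →
    ∀ c ∈ Nat.toDigitsCore 2 fuel n acc, c = '0' ∨ c = '1' := by
  induction fuel with
  | zero => intro n acc h; simpa [Nat.toDigitsCore] using h
  | succ f ih =>
    intro n acc h c hc
    rw [Nat.toDigitsCore] at hc
    have hd : Nat.digitChar (n % 2) = '0' ∨ Nat.digitChar (n % 2) = '1' := by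
      have h2 : n % 2 < 2 := Nat.mod_lt _ (by omega)
      interval_cases hnm : n % 2 <;> simp [Nat.digitChar]
    have hacc : ∀ x ∈ (Nat.digitChar (n % 2) :: acc), x = '0' ∨ x = '1' := by
      intro x hx
      rcases List.mem_cons.mp hx with rfl | hx
      · exact hd
      · exact h x hx
    by_cases h2 : n / 2 = 0
    · simp only [h2] at hc
      exact hacc c hc
    · simp only [if_neg h2] at hc
      exact ih (n/2) _ hacc c hc

theorem digits_mem (m : Nat) : ∀ c ∈ Nat.toDigits 2 m, c = '0' ∨ c = '1' := by
  intro c hc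
  rw [Nat.toDigits] at hc
  exact toDigitsCore_mem _ _ [] (by simp) c hc

theorem binChars_mem (v : Int) :
    ∀ c ∈ PySem.Chars.zfill (PySem.Int.toBinChars v) 100, c = '0' ∨ c = '1' ∨ c = '-' := by
  have hb : ∀ c ∈ PySem.Int.toBinChars v, c = '0' ∨ c = '1' ∨ c = '-' := by
    intro c hc
    unfold PySem.Int.toBinChars at hc
    split at hc
    · rcases List.mem_cons.mp hc with rfl | hc
      · right; right; rfl
      · rcases digits_mem _ c hc with h | h
        · left; exact h
        · right; left; exact h
    · rcases digits_mem _ c hc with h | h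
      · left; exact h
      · right; left; exact h
  intro c hc
  unfold PySem.Chars.zfill at hc
  split at hc
  · exact hb c hc
  · split at hc
    next d t heq =>
      split_ifs at hc with hsign
      · rcases List.mem_cons.mp hc with rfl | hc
        · exact hb _ (by rw [heq]; exact List.mem_cons_self)
        · rcases List.mem_append.mp hc with hc | hc
          · left; exact (List.mem_replicate.mp hc).2
          · exact hb c (by rw [heq]; exact List.mem_cons_of_mem _ hc)
      · rcases List.mem_append.mp hc with hc | hc
        · left; exact (List.mem_replicate.mp hc).2
        · exact hb c hc
    next => left; exact (List.mem_replicate.mp hc).2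

theorem intercalate_cons₂ (s a : List Char) (b : List Char) (t : List (List Char)) :
    List.intercalate s (a :: b :: t) = a ++ s ++ List.intercalate s (b :: t) := by
  simp [List.intercalate, List.intersperse]

theorem chunks8_nil_iff (l : List Char) : chunks8 l = [] ↔ l = [] := by
  cases l with
  | nil => simp [chunks8]
  | cons c t => rw [chunks8_cons]; simp

theorem chunks8_small (l : List Char) (h : l ≠ []) (h8 : l.length ≤ 8) :
    chunks8 l = [l] := by
  cases l with
  | nil => simp at h
  | cons c t =>
    rw [chunks8_cons, List.take_of_length_le h8, List.drop_eq_nil_of_le h8]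
    simp [chunks8]

theorem jn_cons_big (l : List Char) (h : 8 < l.length) :
    jn l = l.take 8 ++ ' ' :: jn (l.drop 8) := by
  unfold jn
  cases l with
  | nil => simp at h
  | cons c t =>
    rw [chunks8_cons]
    have hd : (c :: t).drop 8 ≠ [] := by
      intro he
      rw [List.drop_eq_nil_iff] at he
      omega
    obtain ⟨b, t2, hbt⟩ : ∃ b t2, chunks8 ((c :: t).drop 8) = b :: t2 := by
      cases hcc : chunks8 ((c :: t).drop 8) with
      | nil => exact absurd ((chunks8_nil_iff _).mp hcc) hd
      | cons b t2 => exact ⟨b, t2, rfl⟩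
    rw [hbt, intercalate_cons₂, ← hbt]
    simp

theorem map_range_getD (l : List Char) (d : Char) :
    (List.range l.length).map (fun i => l.getD i d) = l := by
  apply List.ext_getElem
  · simp
  · intro i h1 h2
    simp [List.getD_eq_getElem?_getD, List.getElem?_eq_getElem h2]

theorem interA_small (l : List Char) (h : l.length < 8) : interA l = l := by
  unfold interA
  rw [List.flatMap_congr (g := fun i => [l.getD i ' '])]
  · rw [← List.map_eq_flatMap]
    exact map_range_getD l ' '
  · intro i hi
    have hi' : i < l.length := List.mem_range.mp hi
    have hm : (i + 1) % 8 = i + 1 := Nat.mod_eq_of_lt (by omega)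
    simp [hm]

theorem getD_drop' (l : List Char) (m i : Nat) (d : Char) :
    (l.drop m).getD i d = l.getD (m + i) d := by
  simp [List.getD_eq_getElem?_getD, List.getElem?_drop]

theorem take8_explicit (l : List Char) (h : 8 ≤ l.length) :
    l.take 8 = [l.getD 0 ' ', l.getD 1 ' ', l.getD 2 ' ', l.getD 3 ' ',
                l.getD 4 ' ', l.getD 5 ' ', l.getD 6 ' ', l.getD 7 ' '] := by
  apply List.ext_getElem
  · simp; omega
  · intro i h1 h2
    simp only [List.length_take] at h1
    have hi8 : i < 8 := by omega
    have hil : i < l.length := by omega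
    interval_cases i <;>
      simp [List.getD_eq_getElem?_getD, List.getElem?_eq_getElem hil, List.getElem_take]

theorem interA_step (l : List Char) (h : 8 ≤ l.length) :
    interA l = l.take 8 ++ ' ' :: interA (l.drop 8) := by
  unfold interA
  have hn : l.length = 8 + (l.length - 8) := by omega
  rw [hn, List.range_add, List.flatMap_append, List.flatMap_map]
  have h2 : ((List.range (l.length - 8)).flatMap
      (fun a => if ((8 + a + 1) % 8 == 0) then [l.getD (8 + a) ' ', ' '] else [l.getD (8 + a) ' ']))
      = (List.range ((l.drop 8).length)).flatMap
      (fun i => if (i + 1) % 8 == 0 then [(l.drop 8).getD i ' ', ' '] else [(l.drop 8).getD i ' ']) := by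
    rw [show (l.drop 8).length = l.length - 8 by simp]
    apply List.flatMap_congr
    intro i _
    simp only [getD_drop']
    have hm : (8 + i + 1) % 8 = (i + 1) % 8 := by omega
    rw [hm]
  rw [h2]
  have h3 : (List.range 8).flatMap
      (fun i => if (i + 1) % 8 == 0 then [l.getD i ' ', ' '] else [l.getD i ' '])
      = l.take 8 ++ [' '] := by
    rw [take8_explicit l h]
    rfl
  rw [h3, List.append_assoc]
  rfl

theorem interA_chunks : ∀ l : List Char,
    interA l = jn l ++ (if l.length % 8 = 0 ∧ l ≠ [] then [' '] else []) := by
  intro l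
  induction l using chunks8.induct with
  | case1 => simp [interA, jn, chunks8, List.intercalate]
  | case2 c t ih =>
    have hd : (c :: t).drop 8 = t.drop 7 := rfl
    rw [← hd] at ih
    by_cases h8 : (c :: t).length < 8
    · rw [interA_small _ h8, jn, chunks8_small _ (by simp) (by omega)]
      have hcond : ¬((c :: t).length % 8 = 0 ∧ (c :: t) ≠ []) := by
        simp at h8 ⊢
        intro hmod
        have := Nat.mod_eq_of_lt (show (c :: t).length < 8 by simpa using h8)
        simp at this
        omega
      rw [if_neg hcond]
      simp [List.intercalate]
    · rw [Nat.not_lt] at h8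
      rw [interA_step _ h8, ih]
      by_cases heq : (c :: t).length = 8
      · have hdrop : (c :: t).drop 8 = [] := by rw [List.drop_eq_nil_iff]; omega
        have hj : jn (c :: t) = c :: t := by
          rw [jn, chunks8_small (c :: t) (by simp) (le_of_eq heq)]
          simp [List.intercalate]
        have h0 : (t.length + 1) % 8 = 0 := by simp at heq; omega
        rw [hdrop, hj, List.take_of_length_le (le_of_eq heq)]
        simp [jn, chunks8, List.intercalate, h0]
      · have hlen : 8 < (c :: t).length := by omega
        rw [jn_cons_big _ hlen]
        have hm : (c :: t).length % 8 = ((c :: t).drop 8).length % 8 := by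
          have h7 : 7 < t.length := by simpa using hlen
          simp; omega
        have hne : (c :: t).drop 8 ≠ [] := by
          intro he; rw [List.drop_eq_nil_iff] at he; omega
        rw [hm]
        have h7 : 7 < t.length := by simp at hlen; omega
        simp [h7]

theorem jn_decomp (c : Char) (t : List Char) :
    ∃ z, jn (c :: t) = (c :: t).take 8 ++ z := by
  unfold jn
  rw [chunks8_cons]
  cases hcc : chunks8 ((c :: t).drop 8) with
  | nil => exact ⟨[], by simp [List.intercalate]⟩
  | cons b t2 => exact ⟨[' '] ++ List.intercalate [' '] (b :: t2), by rw [intercalate_cons₂]; simp⟩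

theorem jn_getLast? (l : List Char) : l ≠ [] → (jn l).getLast? = l.getLast? := by
  induction l using chunks8.induct with
  | case1 => simp
  | case2 c t ih =>
    intro _
    have hd : (c :: t).drop 8 = t.drop 7 := rfl
    rw [← hd] at ih
    by_cases h8 : (c :: t).length ≤ 8
    · rw [jn, chunks8_small _ (by simp) h8]
      simp [List.intercalate]
    · rw [Nat.not_le] at h8
      have hne : (c :: t).drop 8 ≠ [] := by
        intro he; rw [List.drop_eq_nil_iff] at he; omega
      rw [jn_cons_big _ h8]
      obtain ⟨x, hx⟩ : ∃ x, (jn ((c :: t).drop 8)).getLast? = some x := by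
        rw [ih hne]
        exact List.getLast?_isSome.mpr hne |> Option.isSome_iff_exists.mp
      rw [List.getLast?_append]
      have h1 : (' ' :: jn ((c :: t).drop 8)).getLast? = some x := by
        cases hj : jn ((c :: t).drop 8) with
        | nil => rw [hj] at hx; simp at hx
        | cons y ys => rw [List.getLast?_cons_cons, ← hj, hx]
      rw [h1]
      simp
      rw [← hx, ih hne]
      have hsplit : c :: t = (c :: t).take 8 ++ (c :: t).drop 8 := by simp
      conv_rhs => rw [hsplit]
      rw [List.getLast?_append]
      obtain ⟨y, hy⟩ := List.getLast?_isSome.mpr hne |> Option.isSome_iff_exists.mp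
      rw [hy]
      simp

theorem strip_jn (l : List Char) (h : l ≠ [])
    (hs : ∀ c ∈ l, PySem.Chars.isspace c = false) (s : List Char)
    (htail : s = [] ∨ s = [' ']) :
    PySem.Chars.strip (jn l ++ s) = jn l := by
  cases l with
  | nil => simp at h
  | cons c t =>
    obtain ⟨z, hz⟩ := jn_decomp c t
    have hc0 : PySem.Chars.isspace c = false := hs c (by simp)
    obtain ⟨r, hr⟩ : ∃ r, jn (c :: t) = c :: r := by
      refine ⟨t.take 7 ++ z, ?_⟩
      rw [hz]; rfl
    obtain ⟨x, hx⟩ : ∃ x, (c :: t).getLast? = some x :=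
      List.getLast?_isSome.mpr (by simp) |> Option.isSome_iff_exists.mp
    have hxs : PySem.Chars.isspace x = false := hs x (List.mem_of_getLast? hx)
    have hlast : (jn (c :: t)).reverse.head? = some x := by
      rw [List.head?_reverse, jn_getLast? _ (by simp), hx]
    have hdw : List.dropWhile PySem.Chars.isspace (jn (c :: t)).reverse = (jn (c :: t)).reverse := by
      cases hrev : (jn (c :: t)).reverse with
      | nil => rfl
      | cons y ys =>
        rw [hrev] at hlast
        simp at hlast
        subst hlast
        exact List.dropWhile_cons_of_neg (by rw [hxs]; simp)
    unfold PySem.Chars.strip PySem.Chars.lstrip PySem.Chars.rstrip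
    have hl : List.dropWhile PySem.Chars.isspace (jn (c :: t) ++ s) = jn (c :: t) ++ s := by
      rw [hr]
      exact List.dropWhile_cons_of_neg (by rw [hc0]; simp)
    rw [hl]
    rcases htail with rfl | rfl
    · rw [List.append_nil, hdw, List.reverse_reverse]
    · rw [List.reverse_append]
      show (List.dropWhile PySem.Chars.isspace (' ' :: (jn (c :: t)).reverse)).reverse = _
      rw [List.dropWhile_cons_of_pos (by decide), hdw, List.reverse_reverse]

theorem replace_space_go : ∀ (n : Nat) (l acc : List Char), l.length ≤ n →
    PySem.Chars.replace.go [' '] [] n l acc = acc.reverse ++ l.filter (fun c => c != ' ') := by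
  intro n
  induction n with
  | zero =>
    intro l acc h
    have hl : l = [] := List.eq_nil_of_length_eq_zero (by omega)
    subst hl
    rw [PySem.Chars.replace.go.eq_def]
    simp
  | succ f ih =>
    intro l acc h
    cases l with
    | nil => rw [PySem.Chars.replace.go.eq_def]; simp
    | cons c t =>
      rw [PySem.Chars.replace.go.eq_def]
      simp only [List.isPrefixOf, List.filter_cons]
      by_cases hc : c = ' '
      · subst hc
        simp only [BEq.rfl, Bool.true_and]
        rw [if_pos (by simp)]
        have := ih t acc (by simpa using h)
        simpa using this
      · rw [if_neg (by simpa using Ne.symm hc)]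
        rw [ih t (c :: acc) (by simpa using h)]
        have hcb : (c != ' ') = true := by simpa using hc
        simp [hcb]

theorem replace_space (l : List Char) :
    PySem.Chars.replace l [' '] [] = l.filter (fun c => c != ' ') := by
  unfold PySem.Chars.replace
  rw [if_neg (by simp)]
  simpa using replace_space_go l.length l [] (le_refl _)

theorem filter_jn (l : List Char) (h : ∀ c ∈ l, c ≠ ' ') :
    (jn l).filter (fun c => c != ' ') = l := by
  induction l using chunks8.induct with
  | case1 => simp [jn, chunks8, List.intercalate]
  | case2 c t ih =>
    have hd : (c :: t).drop 8 = t.drop 7 := rfl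
    rw [← hd] at ih
    by_cases h8 : (c :: t).length ≤ 8
    · rw [jn, chunks8_small _ (by simp) h8]
      have hj : List.intercalate [' '] [c :: t] = c :: t := by simp [List.intercalate]
      rw [hj]
      exact List.filter_eq_self.mpr (fun a ha => by simpa using h a ha)
    · rw [Nat.not_le] at h8
      rw [jn_cons_big _ h8, List.filter_append, List.filter_cons]
      have hsp : ((' ' : Char) != ' ') = false := by decide
      rw [hsp]
      simp only [Bool.false_eq_true, if_false]
      have h1 : ((c :: t).take 8).filter (fun c => c != ' ') = (c :: t).take 8 :=
        List.filter_eq_self.mpr (fun a ha => by simpa using h a (List.mem_of_mem_take ha))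
      have h2 : (jn ((c :: t).drop 8)).filter (fun c => c != ' ') = (c :: t).drop 8 :=
        ih (fun a ha => h a (List.mem_of_mem_drop ha))
      rw [h1, h2, List.take_append_drop]

theorem pyRange_step8 (n : Nat) :
    PySem.List.pyRange 0 (n : Int) 8 = (List.range ((n+7)/8)).map (fun k => ((8*k : Nat) : Int)) := by
  rw [PySem.List.pyRange_of_pos 0 (n : Int) (by norm_num)]
  have hcnt : (if (0:Int) < (n:Int) then (((n:Int) - 0 + 8 - 1)/8).toNat else 0) = (n+7)/8 := by
    split <;> omega
  rw [hcnt]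
  apply List.map_congr_left
  intro k _
  push_cast
  ring

theorem chunks_takedrop : ∀ l : List Char,
    (List.range ((l.length+7)/8)).map (fun k => (l.drop (8*k)).take 8) = chunks8 l := by
  intro l
  induction l using chunks8.induct with
  | case1 => simp [chunks8]
  | case2 c t ih =>
    have hd : (c :: t).drop 8 = t.drop 7 := rfl
    rw [← hd] at ih
    have hn : ((c :: t).length + 7)/8 = (((c :: t).drop 8).length + 7)/8 + 1 := by
      simp; omega
    rw [hn, List.range_succ_eq_map, List.map_cons, List.map_map, chunks8.eq_def]
    refine congrArg₂ List.cons (by simp) ?_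
    simp only [List.length_drop, List.length_cons] at ih ⊢
    rw [show (t.length + 1 - 8 + 7)/8 = (t.length - 7 + 7)/8 by omega] at ih
    rw [hd] at ih
    rw [← ih]
    apply List.map_congr_left
    intro k _
    simp only [Function.comp_apply, List.drop_drop, ← hd]
    congr 2
    omega

theorem chunksB_eq (l : List Char) :
    (PySem.List.pyRange 0 (l.length : Int) 8).map
        (fun i => PySem.List.slice l (some i) (some (i + 8))) = chunks8 l := by
  rw [pyRange_step8, List.map_map, ← chunks_takedrop l]
  apply List.map_congr_left
  intro k _
  simp only [Function.comp_apply]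
  have h8 : ((8*k : Nat) : Int) + 8 = ((8*k : Nat) : Int) + ((8 : Nat) : Int) := by norm_num
  rw [h8, PySem.List.slice_natCast_add]

-- the whole pipeline below the shared prefix, as a function of the sliced bit list
theorem main_bits (bits : List Char) (hmem : ∀ c ∈ bits, c = '0' ∨ c = '1' ∨ c = '-') :
    PySem.Int.toChars (((PySem.Chars.replace (PySem.Chars.strip (interA bits)) [' '] []).length : Int))
      ++ ['b'] ++ (PySem.Chars.strip (interA bits)).reverse
    = PySem.Int.toChars ((bits.length : Int)) ++ ['b']
      ++ (PySem.Chars.join [' '] ((PySem.List.pyRange 0 (bits.length : Int) 8).map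
          (fun i => PySem.List.slice bits (some i) (some (i + 8))))).reverse := by
  have hs : ∀ c ∈ bits, PySem.Chars.isspace c = false := by
    intro c hc
    rcases hmem c hc with rfl | rfl | rfl <;> decide
  have hne : ∀ c ∈ bits, c ≠ ' ' := by
    intro c hc
    rcases hmem c hc with rfl | rfl | rfl <;> decide
  have hstrip : PySem.Chars.strip (interA bits) = jn bits := by
    by_cases hb : bits = []
    · subst hb
      show PySem.Chars.strip (interA []) = jn []
      simp [jn, interA, chunks8, List.intercalate, PySem.Chars.strip, PySem.Chars.lstrip, PySem.Chars.rstrip]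
    · rw [interA_chunks bits]
      by_cases hm : bits.length % 8 = 0
      · rw [if_pos ⟨hm, hb⟩]
        exact strip_jn bits hb hs [' '] (Or.inr rfl)
      · rw [if_neg (by tauto)]
        exact strip_jn bits hb hs [] (Or.inl rfl)
  have hjoin : PySem.Chars.join [' ']
      ((PySem.List.pyRange 0 (bits.length : Int) 8).map
        (fun i => PySem.List.slice bits (some i) (some (i + 8)))) = jn bits := by
    show List.intercalate [' '] _ = jn bits
    rw [chunksB_eq bits]
    rfl
  rw [hstrip, hjoin, replace_space, filter_jn bits hne]

-- ===== VERDICT (by name: the statement is the Claim_ definition above) =====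
theorem reg_bits_spec : Claim_equal_reg_bits := by
  intro val msb lsb _
  unfold Spec_reg_bits reg_bits reg_bits_alt
  apply congrArg String.ofList
  exact main_bits
    (PySem.List.slice ((PySem.Chars.zfill (PySem.Int.toBinChars val) 100).reverse) (some lsb) (some (msb + 1)))
    (fun c hc => binChars_mem val c (List.mem_reverse.mp (PySem.List.mem_of_mem_slice _ _ _ hc)))
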